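-- pv_equiv track=rewrite | github.com/Sebasreyes01/proyecto-pimo | proyecto.py | hashcode
-- ===== SOURCE A (Python) =====
-- def hashcode(lon, lat):
--     """Pre: lon es la longitud de la ciudad y lat la latitud
--     post:retorna el hashcode de esa ciudad
--     """
--     code = ''
--     a = lon + lat
--     for i in a:
--         if i.isalnum():
--             code += i
--     code = code.replace('N', str(ord('N')))
--     code = code.replace('E', str(ord('E')))
--     code = code.replace('S', str(ord('S')))
--     code = code.replace('O', str(ord('O')))
--     return int(code)
-- ===== SOURCE B (Python) =====
-- def hashcode(lon, lat):
--     # Computes the hashcode arithmetically (Horner-style accumulation):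
--     # no intermediate code string is built and no final int() parse is done.
--     letter = {'N': 78, 'E': 69, 'S': 83, 'O': 79}
--     acc = None
--     for ch in lon + lat:
--         if ch.isalnum():
--             base = 0 if acc is None else acc
--             if ch in letter:
--                 acc = base * 100 + letter[ch]
--             else:
--                 acc = base * 10 + int(ch)
--     if acc is None:
--         raise ValueError("hashcode: no alphanumeric characters")
--     return acc
-- ===== Notes on version B (the rewrite author's own statement) =====
-- stated objective: alternative
-- what changed: A builds a filtered character string, rewrites it with four sequential str.replace passes and parses the result with int(); B never builds the code string: it folds the kept characters into an integer accumulator directly (Horner steps: *100 + ord-code for N/E/S/O, *10 + digit otherwise), so the final int() parse disappears.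
import Mathlib
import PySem

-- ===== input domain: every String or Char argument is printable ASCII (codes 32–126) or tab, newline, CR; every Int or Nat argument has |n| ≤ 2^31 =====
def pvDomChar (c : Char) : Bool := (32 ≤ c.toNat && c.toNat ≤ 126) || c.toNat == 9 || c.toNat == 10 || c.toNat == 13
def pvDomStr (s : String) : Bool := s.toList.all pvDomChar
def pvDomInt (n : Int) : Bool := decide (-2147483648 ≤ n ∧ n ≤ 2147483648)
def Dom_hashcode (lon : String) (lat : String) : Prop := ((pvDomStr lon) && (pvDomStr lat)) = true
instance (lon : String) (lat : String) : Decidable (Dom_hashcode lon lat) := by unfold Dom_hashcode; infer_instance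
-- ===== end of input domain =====

-- B computes the hashcode arithmetically (Horner-style accumulator, one pass, no code string and no final int() parse) where A builds a filtered string, makes four replace passes and parses it; same return value wherever A returns.


-- ===== PORT A =====
-- literal port of A: filter loop appending alnum chars, then four sequential replaces, then int();
-- int() raising ValueError (ofChars? = none) is excluded by Pre_hashcode.
def hashcode (lon : String) (lat : String) : Int :=
  let a := lon.toList ++ lat.toList
  let code := a.foldl (fun acc i => if PySem.Chars.isalnum i then acc ++ [i] else acc) []
  let code := PySem.Chars.replace code ['N'] ['7', '8']
  let code := PySem.Chars.replace code ['E'] ['6', '9']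
  let code := PySem.Chars.replace code ['S'] ['8', '3']
  let code := PySem.Chars.replace code ['O'] ['7', '9']
  (PySem.Int.ofChars? code).getD 0

-- ===== PORT B =====
-- the dict {'N': 78, 'E': 69, 'S': 83, 'O': 79}
def hcLetter : PySem.Dict Char Int :=
  ((((PySem.Dict.empty).insert 'N' 78).insert 'E' 69).insert 'S' 83).insert 'O' 79

-- the loop body of Source B: one arithmetic Horner step per kept character
def hcStep (acc : Option Int) (ch : Char) : Option Int :=
  if PySem.Chars.isalnum ch then
    let base := acc.getD 0
    match hcLetter.get? ch with
    | some v => some (base * 100 + v)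
    | none => some (base * 10 + (PySem.Int.ofChars? [ch]).getD 0)  -- int(ch); its ValueError is excluded by Pre_hashcode
  else acc

def hashcode_alt (lon : String) (lat : String) : Int :=
  -- acc = none: Source B raises ValueError there (as does A); excluded by Pre_hashcode
  (((lon.toList ++ lat.toList).foldl hcStep none).getD 0)

-- ===== PRECONDITION & SPEC =====
-- Pre_ excludes exactly the inputs on which Python's int() raises ValueError in A (B raises there too):
-- the kept alnum characters must be nonempty and each a digit or one of 'N','E','S','O'.
def Pre_hashcode (lon : String) (lat : String) : Prop :=
  ((lon.toList ++ lat.toList).filter PySem.Chars.isalnum ≠ []) ∧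
  (((lon.toList ++ lat.toList).filter PySem.Chars.isalnum).all
    (fun c => PySem.Chars.isdigit c || c == 'N' || c == 'E' || c == 'S' || c == 'O') = true)
instance (lon : String) (lat : String) : Decidable (Pre_hashcode lon lat) := by
  unfold Pre_hashcode; infer_instance
def pvWitness_hashcode : String × String := ("4N", "5S")
def Spec_hashcode (lon : String) (lat : String) (out : Int) : Prop := out = hashcode_alt lon lat
instance (lon : String) (lat : String) (out : Int) : Decidable (Spec_hashcode lon lat out) := by unfold Spec_hashcode; infer_instance

-- ===== CLAIM (what is proved, stated in full; the proofs are below) =====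
def Claim_equal_hashcode : Prop := ∀ (lon : String) (lat : String), Dom_hashcode lon lat → Pre_hashcode lon lat → Spec_hashcode lon lat (hashcode lon lat)

-- ===== LEMMAS AND PROOFS =====

-- the per-character substitution table implemented by A's four replace passes
def hcTable (c : Char) : List Char :=
  if c = 'N' then ['7', '8'] else if c = 'E' then ['6', '9']
  else if c = 'S' then ['8', '3'] else if c = 'O' then ['7', '9'] else [c]

-- A's admissible characters (Prop form of the test in Pre_hashcode)
def hcValid (c : Char) : Prop :=
  PySem.Chars.isdigit c = true ∨ c = 'N' ∨ c = 'E' ∨ c = 'S' ∨ c = 'O'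

-- decimal value of a digit list, Nat (Horner, as Python's int() computes it)
def hornerN (acc : Nat) (ds : List Char) : Nat :=
  ds.foldl (fun a c => a * 10 + (c.toNat - '0'.toNat)) acc

-- decimal value of a digit list, Int (as Source B's accumulator computes it)
def hornerI (n : Int) (ds : List Char) : Int :=
  ds.foldl (fun a c => a * 10 + ((c.toNat : Int) - 48)) n

-- ---- A-side: the four replace passes are per-character substitution ----

theorem replace_go_single (k : Char) (rep : List Char) :
    ∀ (l : List Char) (fuel : Nat) (acc : List Char), l.length ≤ fuel →
      PySem.Chars.replace.go [k] rep fuel l acc =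
        acc.reverse ++ l.flatMap (fun x => if x = k then rep else [x]) := by
  intro l
  induction l with
  | nil =>
    intro fuel acc _
    cases fuel <;> simp [PySem.Chars.replace.go]
  | cons c t ih =>
    intro fuel acc hf
    cases fuel with
    | zero => simp at hf
    | succ fuel =>
      simp only [List.length_cons] at hf
      by_cases hc : c = k
      · have hpre : [k].isPrefixOf (c :: t) = true := by simp [List.isPrefixOf, hc]
        simp only [PySem.Chars.replace.go, hpre, if_pos]
        rw [show List.drop [k].length (c :: t) = t from rfl,
          ih fuel (rep.reverse ++ acc) (by omega)]
        simp [hc]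
      · have hk : (k == c) = false := beq_eq_false_iff_ne.mpr (fun h => hc h.symm)
        have hpre : [k].isPrefixOf (c :: t) = false := by simp [List.isPrefixOf, hk]
        simp only [PySem.Chars.replace.go, hpre]
        rw [ih fuel (c :: acc) (by omega)]
        simp [hc]

theorem replace_single (s : List Char) (k : Char) (rep : List Char) :
    PySem.Chars.replace s [k] rep = s.flatMap (fun x => if x = k then rep else [x]) := by
  simp [PySem.Chars.replace, replace_go_single k rep s s.length [] (le_refl _)]

theorem chain_eq (s : List Char) :
    ((((s.flatMap (fun x => if x = 'N' then ['7','8'] else [x])).flatMap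
        (fun x => if x = 'E' then ['6','9'] else [x])).flatMap
        (fun x => if x = 'S' then ['8','3'] else [x])).flatMap
        (fun x => if x = 'O' then ['7','9'] else [x])) = s.flatMap hcTable := by
  rw [List.flatMap_assoc, List.flatMap_assoc, List.flatMap_assoc]
  refine List.flatMap_congr (fun x _ => ?_)
  by_cases hN : x = 'N'
  · subst hN; decide
  by_cases hE : x = 'E'
  · subst hE; decide
  by_cases hS : x = 'S'
  · subst hS; decide
  by_cases hO : x = 'O'
  · subst hO; decide
  simp [hcTable, hN, hE, hS, hO]

-- ---- int() on a nonempty list of ASCII digit characters is Horner evaluation ----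

-- the recursion satisfied by the (private) digit scanner inside PySem.Int.ofChars?;
-- g is pinned to that scanner by unification at the use site, the equations hold by rfl
theorem goHorner (g : List Char → Bool → Nat → Option Nat)
    (hcons : ∀ (c : Char) (rest : List Char) (b : Bool) (acc : Nat),
      g (c :: rest) b acc =
        if c.isDigit = true then g rest true (acc * 10 + (c.toNat - '0'.toNat))
        else if c = '_' ∧ b = true then
          (match rest with
            | d :: _tail => if d.isDigit = true then g rest false acc else none
            | [] => none)
        else none)
    (hnil : ∀ (b : Bool) (acc : Nat), g [] b acc = if b = true then some acc else none) :
    ∀ (ds : List Char) (b : Bool) (acc : Nat), (b = true ∨ ds ≠ []) →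
      (∀ c ∈ ds, c.isDigit = true) → g ds b acc = some (hornerN acc ds) := by
  intro ds
  induction ds with
  | nil =>
    intro b acc h _
    rcases h with h | h
    · rw [hnil, if_pos h]; rfl
    · exact absurd rfl h
  | cons c rest ih =>
    intro b acc _ hd
    have hc : c.isDigit = true := hd c (by simp)
    rw [hcons, if_pos hc,
      ih true _ (Or.inl rfl) (fun x hx => hd x (List.mem_cons_of_mem _ hx))]
    rfl

theorem optWrap (o : Option Nat) (v : Nat) (h : o = some v) :
    Option.map (fun n : Int => n) (o.bind fun a => pure ((a : Nat) : Int)) = some (Int.ofNat v) := by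
  rw [h]; rfl

theorem ofChars?_digits (ds : List Char) (hne : ds ≠ []) (hd : ∀ c ∈ ds, c.isDigit = true) :
    PySem.Int.ofChars? ds = some (Int.ofNat (hornerN 0 ds)) := by
  have hnospace : ∀ (l : List Char), (∀ c ∈ l, c.isDigit = true) →
      l.dropWhile PySem.Int.isIntSpace = l := by
    intro l hl
    rw [List.dropWhile_eq_self_iff]
    intro hlen hsp
    have hdig := hl l[0] (List.getElem_mem hlen)
    simp only [PySem.Int.isIntSpace, Bool.or_eq_true, decide_eq_true_eq] at hsp
    rcases hsp with ((((h|h)|h)|h)|h)|h <;> rw [h] at hdig <;> simp [Char.isDigit] at hdig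
  have hrev : ∀ c ∈ ds.reverse, c.isDigit = true := by simpa using hd
  unfold PySem.Int.ofChars?
  rw [hnospace ds hd, hnospace ds.reverse hrev, List.reverse_reverse]
  cases ds with
  | nil => exact absurd rfl hne
  | cons c rest =>
    have hc : c.isDigit = true := hd c (by simp)
    have hcm : c ≠ '-' := by rintro rfl; simp [Char.isDigit] at hc
    have hcp : c ≠ '+' := by rintro rfl; simp [Char.isDigit] at hc
    dsimp only
    split
    · rename_i ds' h; injection h with h1 _; exact absurd h1 hcm
    · rename_i ds' h; injection h with h1 _; exact absurd h1 hcp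
    · refine optWrap _ _ ?_
      conv_lhs => whnf
      rw [hc]
      conv_lhs => whnf
      rw [show hornerN 0 (c :: rest) = hornerN (0 * 10 + (c.toNat - '0'.toNat)) rest from rfl]
      have hrest : ∀ x ∈ rest, x.isDigit = true := fun x hx => hd x (List.mem_cons_of_mem _ hx)
      generalize 0 * 10 + (c.toNat - '0'.toNat) = n
      generalize hb : true = b
      refine goHorner _ ?_ ?_ rest b n (Or.inl hb.symm) hrest
      · intro c' rest' b' acc'; cases rest' <;> rfl
      · intro b' acc'; rfl

-- ---- facts about the admissible characters ----

theorem isdigit_isDigit {c : Char} (h : PySem.Chars.isdigit c = true) : c.isDigit = true := by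
  simp only [PySem.Chars.isdigit, Bool.and_eq_true, decide_eq_true_eq] at h
  simp only [Char.isDigit, Bool.and_eq_true, decide_eq_true_eq]
  exact ⟨h.1, h.2⟩

theorem isdigit_le {c : Char} (h : PySem.Chars.isdigit c = true) :
    48 ≤ c.toNat ∧ c.toNat ≤ 57 := by
  simp only [PySem.Chars.isdigit, Bool.and_eq_true, decide_eq_true_eq, Char.le_def] at h
  exact ⟨h.1, h.2⟩

theorem hcValid_ne {c : Char} (h : PySem.Chars.isdigit c = true) :
    c ≠ 'N' ∧ c ≠ 'E' ∧ c ≠ 'S' ∧ c ≠ 'O' :=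
  ⟨fun hc => by rw [hc] at h; exact absurd h (by decide),
   fun hc => by rw [hc] at h; exact absurd h (by decide),
   fun hc => by rw [hc] at h; exact absurd h (by decide),
   fun hc => by rw [hc] at h; exact absurd h (by decide)⟩

theorem hcTable_digit {c : Char} (h : PySem.Chars.isdigit c = true) : hcTable c = [c] := by
  obtain ⟨h1, h2, h3, h4⟩ := hcValid_ne h
  unfold hcTable
  simp [h1, h2, h3, h4]

theorem hcTable_digits {c : Char} (h : hcValid c) : ∀ d ∈ hcTable c, d.isDigit = true := by
  rcases h with h | rfl | rfl | rfl | rfl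
  · intro d hd
    rw [hcTable_digit h] at hd
    simp only [List.mem_singleton] at hd
    subst hd
    exact isdigit_isDigit h
  · rw [show hcTable 'N' = ['7', '8'] from rfl]
    intro d hd
    rcases List.mem_pair.mp hd with rfl | rfl <;> decide
  · rw [show hcTable 'E' = ['6', '9'] from rfl]
    intro d hd
    rcases List.mem_pair.mp hd with rfl | rfl <;> decide
  · rw [show hcTable 'S' = ['8', '3'] from rfl]
    intro d hd
    rcases List.mem_pair.mp hd with rfl | rfl <;> decide
  · rw [show hcTable 'O' = ['7', '9'] from rfl]
    intro d hd
    rcases List.mem_pair.mp hd with rfl | rfl <;> decide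

theorem hcTable_ne_nil (c : Char) : hcTable c ≠ [] := by
  unfold hcTable
  split_ifs <;> simp

-- ---- B-side: the Horner step consumes exactly the digits A's table emits ----

theorem hornerI_pair (n : Int) (a b : Char) :
    hornerI n [a, b] = n * 100 + (((a.toNat : Int) - 48) * 10 + ((b.toNat : Int) - 48)) := by
  simp only [hornerI, List.foldl_cons, List.foldl_nil]
  ring

theorem hcStep_valid {c : Char} (h : hcValid c) (acc : Option Int) :
    hcStep acc c = some (hornerI (acc.getD 0) (hcTable c)) := by
  rcases h with h | rfl | rfl | rfl | rfl
  · -- digit character: not in the letter dict, int(ch) is its digit value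
    obtain ⟨h48, _⟩ := isdigit_le h
    obtain ⟨h1, h2, h3, h4⟩ := hcValid_ne h
    have halnum : PySem.Chars.isalnum c = true := by
      simp [PySem.Chars.isalnum, h]
    have hget : hcLetter.get? c = none := by
      have b1 : ('N' == c) = false := beq_eq_false_iff_ne.mpr (fun hc => h1 hc.symm)
      have b2 : ('E' == c) = false := beq_eq_false_iff_ne.mpr (fun hc => h2 hc.symm)
      have b3 : ('S' == c) = false := beq_eq_false_iff_ne.mpr (fun hc => h3 hc.symm)
      have b4 : ('O' == c) = false := beq_eq_false_iff_ne.mpr (fun hc => h4 hc.symm)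
      simp [hcLetter, PySem.Dict.get?, PySem.Dict.insert, PySem.Dict.contains,
        PySem.Dict.empty, List.find?, b1, b2, b3, b4]
    have hchar : PySem.Int.ofChars? [c] = some (Int.ofNat (c.toNat - 48)) := by
      have := ofChars?_digits [c] (by simp) (by simpa using isdigit_isDigit h)
      simpa [hornerN] using this
    rw [hcStep, if_pos halnum, hcTable_digit h]
    simp only [hget, hchar]
    simp only [hornerI, List.foldl_cons, List.foldl_nil, Option.getD_some, Int.ofNat_eq_natCast]
    congr 1
    omega
  · rw [hcStep, if_pos (by decide : PySem.Chars.isalnum 'N' = true),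
      show hcLetter.get? 'N' = some 78 from rfl,
      show hcTable 'N' = ['7','8'] from rfl, hornerI_pair,
      show (('7'.toNat : Int) - 48) * 10 + (('8'.toNat : Int) - 48) = (78 : Int) from by decide]
  · rw [hcStep, if_pos (by decide : PySem.Chars.isalnum 'E' = true),
      show hcLetter.get? 'E' = some 69 from rfl,
      show hcTable 'E' = ['6','9'] from rfl, hornerI_pair,
      show (('6'.toNat : Int) - 48) * 10 + (('9'.toNat : Int) - 48) = (69 : Int) from by decide]
  · rw [hcStep, if_pos (by decide : PySem.Chars.isalnum 'S' = true),
      show hcLetter.get? 'S' = some 83 from rfl,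
      show hcTable 'S' = ['8','3'] from rfl, hornerI_pair,
      show (('8'.toNat : Int) - 48) * 10 + (('3'.toNat : Int) - 48) = (83 : Int) from by decide]
  · rw [hcStep, if_pos (by decide : PySem.Chars.isalnum 'O' = true),
      show hcLetter.get? 'O' = some 79 from rfl,
      show hcTable 'O' = ['7','9'] from rfl, hornerI_pair,
      show (('7'.toNat : Int) - 48) * 10 + (('9'.toNat : Int) - 48) = (79 : Int) from by decide]

theorem hornerI_append (n : Int) (a b : List Char) :
    hornerI n (a ++ b) = hornerI (hornerI n a) b := by
  simp [hornerI, List.foldl_append]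

theorem bfold (ks : List Char) (n : Int) (hv : ∀ c ∈ ks, hcValid c) :
    ks.foldl hcStep (some n) = some (hornerI n (ks.flatMap hcTable)) := by
  induction ks generalizing n with
  | nil => simp [hornerI]
  | cons k t ih =>
    have hk : hcValid k := hv k (by simp)
    simp only [List.foldl_cons, hcStep_valid hk, Option.getD_some, List.flatMap_cons,
      hornerI_append]
    exact ih _ (fun c hc => hv c (List.mem_cons_of_mem _ hc))

-- B ignores the characters its filter drops
theorem bfold_filter (s : List Char) (a : Option Int) :
    s.foldl hcStep a = (s.filter PySem.Chars.isalnum).foldl hcStep a := by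
  induction s generalizing a with
  | nil => rfl
  | cons c t ih =>
    by_cases hc : PySem.Chars.isalnum c = true
    · simp [hc, ih]
    · have : hcStep a c = a := by simp [hcStep, hc]
      simp [hc, this, ih]

-- the Nat Horner value (A's parse) and the Int Horner value (B's accumulator) agree
theorem horner_cast (ds : List Char) (hd : ∀ c ∈ ds, c.isDigit = true) :
    ∀ n : Nat, (Int.ofNat (hornerN n ds)) = hornerI (Int.ofNat n) ds := by
  induction ds with
  | nil => intro n; rfl
  | cons c t ih =>
    intro n
    have hc : c.isDigit = true := hd c (by simp)
    have h48 : 48 ≤ c.toNat := by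
      simp only [Char.isDigit, Bool.and_eq_true, decide_eq_true_eq] at hc
      exact hc.1
    simp only [hornerN, hornerI, List.foldl_cons] at *
    rw [ih (fun x hx => hd x (List.mem_cons_of_mem _ hx))]
    congr 1
    simp only [Int.ofNat_eq_natCast, show '0'.toNat = 48 from rfl]
    omega

-- ===== VERDICT (by name: the statement is the Claim_ definition above) =====
theorem hashcode_spec : Claim_equal_hashcode := by
  intro lon lat _ hpre
  obtain ⟨hne, hall⟩ := hpre
  unfold Spec_hashcode hashcode hashcode_alt
  simp only [PySem.List.foldl_append_if_eq_filter, List.nil_append, replace_single]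
  rw [show ∀ l : List Char, l.flatMap (fun x => if x = 'N' then ['7','8'] else [x]) =
      List.flatMap (fun x => if x = 'N' then ['7','8'] else [x]) l from fun _ => rfl]
  rw [chain_eq]
  set ks := (lon.toList ++ lat.toList).filter PySem.Chars.isalnum with hks
  have hv : ∀ c ∈ ks, hcValid c := by
    intro c hc
    have := List.all_eq_true.mp hall c hc
    simp only [Bool.or_eq_true, beq_iff_eq] at this
    unfold hcValid
    tauto
  have hdigits : ∀ d ∈ ks.flatMap hcTable, d.isDigit = true := by
    intro d hd
    obtain ⟨c, hc, hd'⟩ := List.mem_flatMap.mp hd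
    exact hcTable_digits (hv c hc) d hd'
  have hfne : ks.flatMap hcTable ≠ [] := by
    cases hks' : ks with
    | nil => exact absurd hks' hne
    | cons k t =>
      simp only [List.flatMap_cons]
      intro h
      exact hcTable_ne_nil k (List.append_eq_nil_iff.mp h).1
  rw [ofChars?_digits _ hfne hdigits]
  rw [bfold_filter, ← hks]
  cases hks' : ks with
  | nil => exact absurd hks' hne
  | cons k t =>
    rw [hks'] at hv
    have hk : hcValid k := hv k (by simp)
    simp only [List.foldl_cons, hcStep_valid hk, Option.getD_none]
    rw [bfold t _ (fun c hc => hv c (List.mem_cons_of_mem _ hc))]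
    simp only [Option.getD_some]
    rw [hks'] at hdigits
    rw [horner_cast _ hdigits 0, List.flatMap_cons, hornerI_append]
    norm_num
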